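-- pv_equiv track=rewrite | github.com/liaamirt/Python_labs | lab_12/task.py | find_team_place
-- ===== SOURCE A (Python) =====
-- def find_team_place(scores, new_team_score):
--     n = len(scores) + 1
--     teams = sorted(scores, reverse=True)
--
--     new_team_place = 1
--     for score in teams:
--         if new_team_score < score:
--             new_team_place += 1
--         else:
--             break
--
--     lesser_teams = [team_score for team_score in teams if team_score < new_team_score]
--
--     return new_team_place, lesser_teams
-- ===== SOURCE B (Python) =====
-- def find_team_place(scores, new_team_score):
--     # Simpler: rank = 1 + count of strictly greater scores (no full sort, no break loop);
--     # only the strictly-lesser subset is sorted, descending.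
--     new_team_place = 1 + sum(1 for s in scores if s > new_team_score)
--     lesser_teams = sorted((s for s in scores if s < new_team_score), reverse=True)
--     return new_team_place, lesser_teams
-- ===== Notes on version B (the rewrite author's own statement) =====
-- stated objective: simpler
-- what changed: Replaces the full descending sort plus break-loop scan with a direct count of strictly greater scores for the rank, and sorts only the strictly-lesser subset for lesser_teams.
import Mathlib
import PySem

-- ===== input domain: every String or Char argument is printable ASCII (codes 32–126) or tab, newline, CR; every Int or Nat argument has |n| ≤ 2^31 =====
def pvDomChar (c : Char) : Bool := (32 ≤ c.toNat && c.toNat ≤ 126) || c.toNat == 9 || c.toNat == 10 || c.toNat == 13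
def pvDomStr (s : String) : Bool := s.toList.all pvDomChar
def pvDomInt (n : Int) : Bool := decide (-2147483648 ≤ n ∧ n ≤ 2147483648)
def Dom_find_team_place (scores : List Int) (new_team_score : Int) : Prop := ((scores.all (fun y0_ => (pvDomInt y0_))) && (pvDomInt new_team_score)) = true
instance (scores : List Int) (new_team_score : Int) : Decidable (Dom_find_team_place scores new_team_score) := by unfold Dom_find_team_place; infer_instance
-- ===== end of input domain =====

-- B replaces A's full descending sort + break-scan by a direct count of strictly greater
-- scores (rank) and a sort of only the strictly-lesser subset (objective: simpler).

-- ===== PORT A =====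
-- the break-able for-loop of A: stops at the first score not greater than new_team_score
def pvPlaceLoop (new_team_score : Int) : List Int → Int → Int
  | [], acc => acc
  | x :: xs, acc => if new_team_score < x then pvPlaceLoop new_team_score xs (acc + 1) else acc

def find_team_place (scores : List Int) (new_team_score : Int) : Int × List Int :=
  let _n := (scores.length : Int) + 1   -- A computes n but never uses it
  let teams := PySem.List.sorted scores (fun x => x) true
  let new_team_place := pvPlaceLoop new_team_score teams 1
  let lesser_teams := teams.filter (fun team_score => decide (team_score < new_team_score))
  (new_team_place, lesser_teams)

-- ===== PORT B =====
def find_team_place_alt (scores : List Int) (new_team_score : Int) : Int × List Int :=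
  let new_team_place : Int := 1 + ((scores.filter (fun s => decide (new_team_score < s))).length : Int)
  let lesser_teams := PySem.List.sorted (scores.filter (fun s => decide (s < new_team_score))) (fun x => x) true
  (new_team_place, lesser_teams)

-- ===== PRECONDITION & SPEC =====
def Spec_find_team_place (scores : List Int) (new_team_score : Int) (out : Int × List Int) : Prop := out = find_team_place_alt scores new_team_score
instance (scores : List Int) (new_team_score : Int) (out : Int × List Int) : Decidable (Spec_find_team_place scores new_team_score out) := by unfold Spec_find_team_place; infer_instance

-- ===== CLAIM (what is proved, stated in full; the proofs are below) =====
def Claim_equal_find_team_place : Prop := ∀ (scores : List Int) (new_team_score : Int), Dom_find_team_place scores new_team_score → Spec_find_team_place scores new_team_score (find_team_place scores new_team_score)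

-- ===== LEMMAS AND PROOFS =====

-- on a weakly descending list, the break-loop counts ALL elements greater than t
theorem pvPlaceLoop_desc (t : Int) (l : List Int) (acc : Int)
    (h : l.Pairwise (fun a b => b ≤ a)) :
    pvPlaceLoop t l acc = acc + ((l.countP (fun x => decide (t < x))) : Int) := by
  induction l generalizing acc with
  | nil => simp [pvPlaceLoop]
  | cons x xs ih =>
    rcases List.pairwise_cons.mp h with ⟨hx, hxs⟩
    by_cases ht : t < x
    · rw [pvPlaceLoop, if_pos ht, ih _ hxs, List.countP_cons]
      simp [ht]; omega
    · have hzero : xs.countP (fun x => decide (t < x)) = 0 := by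
        rw [List.countP_eq_zero]
        intro b hb
        have := hx b hb
        simp; omega
      rw [pvPlaceLoop, if_neg ht, List.countP_cons]
      simp [ht, hzero]

-- two weakly descending rearrangements of the same Int list coincide
theorem pv_desc_unique (xs ys : List Int) (hp : ys.Perm xs)
    (hs : ys.Pairwise (fun a b => b ≤ a)) :
    PySem.List.sorted xs (fun x => x) true = ys := by
  have hz : (PySem.List.sorted xs (fun x => x) true).Perm ys :=
    (PySem.List.sorted_perm xs (fun x => x) true).trans hp.symm
  have hzs : (PySem.List.sorted xs (fun x => x) true).Pairwise (fun a b => b ≤ a) :=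
    PySem.List.sorted_pairwise_rev xs (fun x => x)
  exact List.Perm.eq_of_pairwise (fun a b _ _ h1 h2 => le_antisymm h2 h1) hzs hs hz

-- ===== VERDICT (by name: the statement is the Claim_ definition above) =====
theorem find_team_place_spec : Claim_equal_find_team_place := by
  intro scores t _
  unfold Spec_find_team_place find_team_place find_team_place_alt
  have hperm := PySem.List.sorted_perm scores (fun x => x) true
  have hdesc := PySem.List.sorted_pairwise_rev scores (fun x => x)
  refine Prod.ext ?_ ?_
  · show pvPlaceLoop t (PySem.List.sorted scores (fun x => x) true) 1
        = 1 + ((scores.filter (fun s => decide (t < s))).length : Int)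
    rw [pvPlaceLoop_desc t _ 1 hdesc, hperm.countP_eq, List.countP_eq_length_filter]
  · show (PySem.List.sorted scores (fun x => x) true).filter (fun s => decide (s < t))
        = PySem.List.sorted (scores.filter (fun s => decide (s < t))) (fun x => x) true
    exact (pv_desc_unique _ _ (hperm.filter _) (hdesc.filter _)).symm
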